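-- pv_equiv track=rewrite | github.com/wilmurillo-ai/Design-Assistant | .skills/openclaw-skills/skills/subscriptionmanager26-png/saffronai-etf-data/scripts/saffronai_etf.py | filter_by_symbols
-- ===== SOURCE A (Python) =====
-- from typing import Iterable
--
-- def filter_by_symbols(rows: Iterable[dict], symbols: list[str]) -> list[dict]:
--     wanted = {s.upper() for s in symbols}
--     out: list[dict] = []
--     for r in rows:
--         sym = (r.get("symbol") or "").upper()
--         if sym in wanted:
--             out.append(r)
--     # Preserve input order of symbols if possible
--     order = {s.upper(): i for i, s in enumerate(symbols)}
--     out.sort(key=lambda r: order.get((r.get("symbol") or "").upper(), 10**9))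
--     return out
-- ===== SOURCE B (Python) =====
-- def filter_by_symbols(rows, symbols):
--     # Bucket pass: index each wanted symbol, drop rows not wanted, and place each
--     # kept row (in input order) into the bucket of its symbol's position; then
--     # concatenate buckets in symbol order.  No comparison sort.
--     order = {}
--     for i, s in enumerate(symbols):
--         order[s.upper()] = i
--     buckets = {}
--     for r in rows:
--         i = order.get((r.get("symbol") or "").upper())
--         if i is not None:
--             buckets.setdefault(i, []).append(r)
--     out = []
--     for i in range(len(symbols)):
--         out.extend(buckets.get(i, []))
--     return out
-- ===== Notes on version B (the rewrite author's own statement) =====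
-- stated objective: alternative
-- what changed: B replaces A's filter-then-stable-comparison-sort with a single bucketing pass: rows are appended to per-symbol-index buckets (dict of lists keyed by the order index) and the buckets are concatenated in index order, so no sort call is made.
import Mathlib
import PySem

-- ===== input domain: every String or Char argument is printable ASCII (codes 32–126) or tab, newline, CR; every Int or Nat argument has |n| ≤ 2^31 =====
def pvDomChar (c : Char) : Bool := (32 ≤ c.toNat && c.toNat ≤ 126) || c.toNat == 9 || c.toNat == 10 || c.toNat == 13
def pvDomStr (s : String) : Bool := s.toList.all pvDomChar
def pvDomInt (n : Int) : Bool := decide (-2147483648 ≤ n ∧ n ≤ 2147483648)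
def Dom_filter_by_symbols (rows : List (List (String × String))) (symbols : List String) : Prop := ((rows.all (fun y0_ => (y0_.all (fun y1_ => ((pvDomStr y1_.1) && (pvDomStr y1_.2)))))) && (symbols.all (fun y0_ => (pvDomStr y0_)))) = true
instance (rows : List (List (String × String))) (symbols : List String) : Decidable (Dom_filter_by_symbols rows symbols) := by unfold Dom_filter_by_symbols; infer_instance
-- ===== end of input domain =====

-- B replaces A's filter-then-comparison-sort by a single bucketing pass over the rows
-- (buckets keyed by the symbol's index, concatenated in index order); no sort call.

-- shared helpers (both Pythons compute these the same way):
-- `(r.get("symbol") or "").upper()`  — `x or ""` maps both None and "" to "" (exact: Option.getD)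
def rowSym (r : List (String × String)) : String :=
  PySem.Str.upper ((PySem.Dict.get? (PySem.Dict.mk r) "symbol").getD "")

-- `{s.upper(): i for i, s in enumerate(symbols)}` (A) / the equivalent explicit loop (B)
def mkOrder (symbols : List String) : PySem.Dict String Int :=
  (PySem.List.enumerate symbols 0).foldl
    (fun d p => d.insert (PySem.Str.upper p.2) p.1) PySem.Dict.empty

-- ===== PORT A =====
def filter_by_symbols (rows : List (List (String × String))) (symbols : List String) : List (List (String × String)) :=
  let wanted : PySem.Set String := PySem.Set.ofList (symbols.map (fun s => PySem.Str.upper s))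
  let out : List (List (String × String)) :=
    rows.foldl (fun acc r => if PySem.Set.contains wanted (rowSym r) then acc ++ [r] else acc) []
  let order : PySem.Dict String Int := mkOrder symbols
  PySem.List.sorted out (fun r => PySem.Dict.getD order (rowSym r) (10 ^ 9)) false

-- ===== PORT B =====
def filter_by_symbols_alt (rows : List (List (String × String))) (symbols : List String) : List (List (String × String)) :=
  let order : PySem.Dict String Int := mkOrder symbols
  let buckets : PySem.Dict Int (List (List (String × String))) :=
    rows.foldl (fun d r =>
      match PySem.Dict.get? order (rowSym r) with
      | some i => d.modify i [] (· ++ [r])   -- buckets.setdefault(i, []).append(r)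
      | none => d) PySem.Dict.empty
  (PySem.List.pyRange 0 (symbols.length : Int) 1).foldl
    (fun acc i => acc ++ PySem.Dict.getD buckets i []) []

-- ===== PRECONDITION & SPEC =====
def Spec_filter_by_symbols (rows : List (List (String × String))) (symbols : List String) (out : List (List (String × String))) : Prop := out = filter_by_symbols_alt rows symbols
instance (rows : List (List (String × String))) (symbols : List String) (out : List (List (String × String))) : Decidable (Spec_filter_by_symbols rows symbols out) := by unfold Spec_filter_by_symbols; infer_instance

-- ===== CLAIM (what is proved, stated in full; the proofs are below) =====
def Claim_equal_filter_by_symbols : Prop := ∀ (rows : List (List (String × String))) (symbols : List String), Dom_filter_by_symbols rows symbols → Spec_filter_by_symbols rows symbols (filter_by_symbols rows symbols)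

-- ===== LEMMAS AND PROOFS =====

-- every value stored in `mkOrder symbols` is an index of `symbols`
lemma foldl_insert_values_bound (P : Int → Prop) :
    ∀ (l : List (Int × String)) (d : PySem.Dict String Int),
      (∀ w ∈ d.values, P w) → (∀ p ∈ l, P p.1) →
      ∀ k v, (l.foldl (fun d p => d.insert (PySem.Str.upper p.2) p.1) d).get? k = some v → P v := by
  intro l
  induction l with
  | nil =>
      intro d hd _ k v hv
      have hmem := PySem.Dict.mem_items_of_get?_eq_some _ hv
      exact hd v (by simp only [PySem.Dict.values]; exact List.mem_map.2 ⟨(k, v), hmem, rfl⟩)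
  | cons p t ih =>
      intro d hd hl k v hv
      refine ih _ ?_ (fun q hq => hl q (List.mem_cons_of_mem _ hq)) k v hv
      intro w hw
      rcases PySem.Dict.mem_values_insert _ _ _ _ hw with h | h
      · exact h ▸ hl p List.mem_cons_self
      · exact hd w h

lemma mkOrder_val_bound (symbols : List String) (k : String) (v : Int)
    (h : (mkOrder symbols).get? k = some v) : 0 ≤ v ∧ v < (symbols.length : Int) := by
  refine foldl_insert_values_bound (fun v => 0 ≤ v ∧ v < (symbols.length : Int))
    (PySem.List.enumerate symbols 0) PySem.Dict.empty
    (by simp [PySem.Dict.values, PySem.Dict.empty]) ?_ k v h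
  intro p hp
  rcases (PySem.List.mem_enumerate_iff symbols 0 p).1 hp with ⟨j, hj, rfl⟩
  constructor <;> simp <;> omega

-- membership in A's `wanted` set is exactly "mkOrder has a value for this key"
lemma contains_wanted_eq (symbols : List String) (s : String) :
    PySem.Set.contains (PySem.Set.ofList (symbols.map (fun s => PySem.Str.upper s))) s
      = ((mkOrder symbols).get? s).isSome := by
  rw [← PySem.Dict.contains_eq_isSome_get?]
  have hkeys : (mkOrder symbols).keys = PySem.Set.ofList (symbols.map (fun s => PySem.Str.upper s)) := by
    unfold mkOrder
    rw [PySem.Dict.keys_foldl_insert_key]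
    have h2 : (PySem.List.enumerate symbols 0).map (fun p => PySem.Str.upper p.2)
        = symbols.map (fun s => PySem.Str.upper s) := by
      conv_rhs => rw [← PySem.List.map_snd_enumerate symbols 0, List.map_map]
      rfl
    rw [h2, PySem.Dict.keys_empty, PySem.Set.ofList_eq_foldl]
    rfl
  rw [Bool.eq_iff_iff, PySem.Dict.contains_iff_mem_keys, hkeys]
  simp [PySem.Set.contains]

-- B's bucket loop: each bucket holds exactly the rows mapped to its index, in order
lemma getD_bucket {α : Type} (f : α → Option Int) (l : List α)
    (d : PySem.Dict Int (List α)) (i : Int) :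
    (l.foldl (fun d r => match f r with
        | some j => d.modify j [] (· ++ [r])
        | none => d) d).getD i []
      = d.getD i [] ++ l.filter (fun r => f r == some i) := by
  induction l generalizing d with
  | nil => simp
  | cons r t ih =>
      cases hf : f r with
      | none => simp [hf, ih]
      | some j =>
          simp only [List.foldl_cons, hf, ih, List.filter_cons]
          by_cases hij : j = i
          · subst hij
            simp [PySem.Dict.getD_modify]
          · have hii : ¬ (i = j) := fun h => hij h.symm
            simp [PySem.Dict.getD_modify, hii, hij]

-- ---- stable sort = bucket concatenation ----
def bucketsOf {α : Type} (key : α → Int) (n : Int) (zs : List α) : List α :=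
  (PySem.List.pyRange 0 n 1).flatMap (fun i => zs.filter (fun x => key x == i))

lemma insertBy_append_not_before {α : Type} (before : α → α → Bool) (x : α) :
    ∀ (l₁ l₂ : List α), (∀ y ∈ l₁, before x y = false) →
      PySem.List.insertBy before x (l₁ ++ l₂) = l₁ ++ PySem.List.insertBy before x l₂ := by
  intro l₁
  induction l₁ with
  | nil => intro l₂ _; simp
  | cons y t ih =>
      intro l₂ h
      have hy : before x y = false := h y List.mem_cons_self
      simp only [List.cons_append, PySem.List.insertBy, hy, Bool.false_eq_true, if_false]
      rw [ih l₂ (fun z hz => h z (List.mem_cons_of_mem _ hz))]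

lemma insertBy_all_before {α : Type} (before : α → α → Bool) (x : α) (l : List α)
    (h : ∀ y ∈ l, before x y = true) :
    PySem.List.insertBy before x l = x :: l := by
  cases l with
  | nil => rfl
  | cons y t => simp [PySem.List.insertBy, h y List.mem_cons_self]

lemma insertBy_buckets {α : Type} (key : α → Int) (n : Int) (ys : List α) (x : α)
    (hx : 0 ≤ key x ∧ key x < n) :
    PySem.List.insertBy (fun a b => decide (key a < key b)) x (bucketsOf key n ys)
      = bucketsOf key n (ys ++ [x]) := by
  set j := key x with hj
  have hsplit : PySem.List.pyRange 0 n 1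
      = PySem.List.pyRange 0 (j + 1) 1 ++ PySem.List.pyRange (j + 1) n 1 :=
    PySem.List.pyRange_one_append 0 (j + 1) n (by omega) (by omega)
  have hsplit2 : PySem.List.pyRange 0 (j + 1) 1
      = PySem.List.pyRange 0 j 1 ++ [j] := by
    rw [PySem.List.pyRange_one_append 0 j (j + 1) (by omega) (by omega),
        PySem.List.pyRange_one_singleton]
  have hL1 : ∀ y ∈ (PySem.List.pyRange 0 (j + 1) 1).flatMap
      (fun i => ys.filter (fun z => key z == i)), (decide (j < key y)) = false := by
    intro y hy
    rcases List.mem_flatMap.1 hy with ⟨i, hi, hyf⟩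
    have hib := PySem.List.mem_pyRange_one.1 hi
    have := List.of_mem_filter hyf
    have hkey : key y = i := by simpa using this
    simp [hkey]; omega
  have hL2 : ∀ y ∈ (PySem.List.pyRange (j + 1) n 1).flatMap
      (fun i => ys.filter (fun z => key z == i)), (decide (j < key y)) = true := by
    intro y hy
    rcases List.mem_flatMap.1 hy with ⟨i, hi, hyf⟩
    have hib := PySem.List.mem_pyRange_one.1 hi
    have := List.of_mem_filter hyf
    have hkey : key y = i := by simpa using this
    simp [hkey]; omega
  -- left side: insert lands exactly after bucket j
  have hLHS : PySem.List.insertBy (fun a b => decide (key a < key b)) x (bucketsOf key n ys)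
      = (PySem.List.pyRange 0 (j + 1) 1).flatMap (fun i => ys.filter (fun z => key z == i))
        ++ x :: (PySem.List.pyRange (j + 1) n 1).flatMap (fun i => ys.filter (fun z => key z == i)) := by
    unfold bucketsOf
    rw [hsplit, List.flatMap_append, insertBy_append_not_before _ _ _ _ (by simpa using hL1),
        insertBy_all_before _ _ _ (by simpa using hL2)]
  rw [hLHS]
  -- right side: the new row extends bucket j only
  unfold bucketsOf
  have hfil : ∀ i : Int, (ys ++ [x]).filter (fun z => key z == i)
      = ys.filter (fun z => key z == i) ++ (if j = i then [x] else []) := by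
    intro i
    rw [List.filter_append]
    by_cases hji : j = i <;> simp [← hj, hji]
  rw [hsplit, List.flatMap_append]
  have hpart2 : (PySem.List.pyRange (j + 1) n 1).flatMap
      (fun i => (ys ++ [x]).filter (fun z => key z == i))
      = (PySem.List.pyRange (j + 1) n 1).flatMap (fun i => ys.filter (fun z => key z == i)) := by
    refine List.flatMap_congr (fun i hi => ?_)
    have hib := PySem.List.mem_pyRange_one.1 hi
    rw [hfil i, if_neg (by omega)]
    simp
  have hpart1 : (PySem.List.pyRange 0 (j + 1) 1).flatMap
      (fun i => (ys ++ [x]).filter (fun z => key z == i))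
      = (PySem.List.pyRange 0 (j + 1) 1).flatMap (fun i => ys.filter (fun z => key z == i)) ++ [x] := by
    rw [hsplit2, List.flatMap_append, List.flatMap_append]
    have hpre : (PySem.List.pyRange 0 j 1).flatMap
        (fun i => (ys ++ [x]).filter (fun z => key z == i))
        = (PySem.List.pyRange 0 j 1).flatMap (fun i => ys.filter (fun z => key z == i)) := by
      refine List.flatMap_congr (fun i hi => ?_)
      have hib := PySem.List.mem_pyRange_one.1 hi
      rw [hfil i, if_neg (by omega)]
      simp
    rw [hpre]
    simp
    rfl
  rw [hpart1, hpart2, List.append_assoc, List.singleton_append]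

lemma sorted_eq_buckets {α : Type} (key : α → Int) (n : Int) (xs : List α)
    (h : ∀ x ∈ xs, 0 ≤ key x ∧ key x < n) :
    PySem.List.sorted xs key false = bucketsOf key n xs := by
  rw [PySem.List.sorted_eq_foldl_insertBy]
  have hnil : bucketsOf key n ([] : List α) = [] := by
    simp [bucketsOf]
  have aux : ∀ (l ys : List α), (∀ x ∈ l, 0 ≤ key x ∧ key x < n) →
      l.foldl (fun acc x => PySem.List.insertBy (fun a b => decide (key a < key b)) x acc)
        (bucketsOf key n ys)
      = bucketsOf key n (ys ++ l) := by
    intro l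
    induction l with
    | nil => intro ys _; simp
    | cons x t ih =>
        intro ys hl
        simp only [List.foldl_cons]
        rw [insertBy_buckets key n ys x (hl x List.mem_cons_self),
            ih (ys ++ [x]) (fun z hz => hl z (List.mem_cons_of_mem _ hz))]
        simp
  have := aux xs [] h
  rw [hnil] at this
  simpa using this

-- ===== assembly =====

-- A = sorted of the filtered rows
lemma A_eq_sorted (rows : List (List (String × String))) (symbols : List String) :
    filter_by_symbols rows symbols
      = PySem.List.sorted
          (rows.filter (fun r => ((mkOrder symbols).get? (rowSym r)).isSome))
          (fun r => PySem.Dict.getD (mkOrder symbols) (rowSym r) (10 ^ 9)) false := by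
  simp only [filter_by_symbols]
  rw [PySem.List.foldl_append_if_eq_filter, List.nil_append]
  congr 1
  exact List.filter_congr (fun r _ => contains_wanted_eq symbols (rowSym r))

lemma B_eq_flatMap (rows : List (List (String × String))) (symbols : List String) :
    filter_by_symbols_alt rows symbols
      = (PySem.List.pyRange 0 (symbols.length : Int) 1).flatMap
          (fun i => rows.filter (fun r => (mkOrder symbols).get? (rowSym r) == some i)) := by
  simp only [filter_by_symbols_alt]
  rw [PySem.List.foldl_append_eq_flatMap, List.nil_append]
  refine List.flatMap_congr (fun i _ => ?_)
  rw [getD_bucket (fun r => (mkOrder symbols).get? (rowSym r)) rows PySem.Dict.empty i]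
  simp

-- ===== VERDICT (by name: the statement is the Claim_ definition above) =====
theorem filter_by_symbols_spec : Claim_equal_filter_by_symbols := by
  intro rows symbols _
  unfold Spec_filter_by_symbols
  rw [A_eq_sorted, B_eq_flatMap]
  rw [sorted_eq_buckets _ ((symbols.length : Int)) _ (by
    intro r hr
    have hp := List.of_mem_filter hr
    rcases Option.isSome_iff_exists.1 (by simpa using hp) with ⟨v, hv⟩
    have := mkOrder_val_bound symbols (rowSym r) v hv
    rw [PySem.Dict.getD_eq_get?_getD, hv]
    simpa using this)]
  unfold bucketsOf
  refine List.flatMap_congr (fun i _ => ?_)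
  rw [List.filter_filter]
  refine List.filter_congr (fun r _ => ?_)
  cases hv : (mkOrder symbols).get? (rowSym r) with
  | none => simp [PySem.Dict.getD_eq_get?_getD, hv]
  | some v =>
      simp [PySem.Dict.getD_eq_get?_getD, hv]
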